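-- pv_equiv track=rewrite | github.com/onien-12/ltejokes | sequence/pseudo_random.py | get_pseudorandom_sequence
-- ===== SOURCE A (Python) =====
-- def get_pseudorandom_sequence(c_init, sequence_length, Nc=1600):
--     c_init_binary = bin(c_init)[2:].rjust(32, "0")
--
--     c = [0] * sequence_length
--     x_1 = [0] * (32 + Nc + sequence_length)
--     x_2 = [0] * (32 + Nc + sequence_length)
--
--     x_1[0] = 1
--     x_1[30] = 0
--
--     for i, bit in enumerate(c_init_binary):
--         x_2[i] = int(bit)
--
--     for n in range(Nc + sequence_length):
--         x_1[n + 31] = (x_1[n + 3] + x_1[n]) % 2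
--         x_2[n + 31] = (x_2[n + 3] + x_2[n + 2] + x_2[n + 1] + x_2[n]) % 2
--
--     for n in range(sequence_length):
--         c[n] = (x_1[n + Nc] + x_2[n + Nc]) % 2
--
--     return c
-- ===== SOURCE B (Python) =====
-- def get_pseudorandom_sequence(c_init, sequence_length, Nc=1600):
--     bits = bin(c_init)[2:].rjust(32, "0")
--     # two bounded 31-bit shift registers instead of full-length history arrays
--     w1 = [1] + [0] * 30
--     w2 = [int(b) for b in bits[:31]]
--     out = []
--     for t in range(Nc + sequence_length):
--         if t >= Nc:
--             out.append((w1[0] + w2[0]) % 2)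
--         w1 = w1[1:] + [(w1[3] + w1[0]) % 2]
--         w2 = w2[1:] + [(w2[3] + w2[2] + w2[1] + w2[0]) % 2]
--     return out
-- ===== Notes on version B (the rewrite author's own statement) =====
-- stated objective: simpler
-- what changed: Replaced the three full-length history arrays and the separate extraction pass by two bounded 31-cell sliding shift registers updated in a single loop that emits an output bit once past the Nc warmup.
-- outside the precondition, e.g. on get_pseudorandom_sequence(1, 2, -1): A returns [0, 1], B returns [1]
import Mathlib
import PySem

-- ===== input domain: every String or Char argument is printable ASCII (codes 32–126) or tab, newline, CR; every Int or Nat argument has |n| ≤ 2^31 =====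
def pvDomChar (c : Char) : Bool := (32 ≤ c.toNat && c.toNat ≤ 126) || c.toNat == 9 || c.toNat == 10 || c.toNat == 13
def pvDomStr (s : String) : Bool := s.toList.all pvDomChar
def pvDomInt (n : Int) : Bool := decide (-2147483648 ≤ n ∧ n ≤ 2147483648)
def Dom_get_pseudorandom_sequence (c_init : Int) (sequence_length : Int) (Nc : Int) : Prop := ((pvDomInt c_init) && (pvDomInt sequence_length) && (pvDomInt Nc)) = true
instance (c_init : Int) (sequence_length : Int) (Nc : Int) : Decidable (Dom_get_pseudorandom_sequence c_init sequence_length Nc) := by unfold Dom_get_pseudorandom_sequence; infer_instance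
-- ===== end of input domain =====

-- B replaces A's three full-length history arrays and separate extraction pass by two bounded
-- 31-cell shift registers updated in one loop (objective: simpler, O(1) auxiliary memory).

-- ===== PORT A =====
-- bin(c)[2:].rjust(32, "0"); rjust ported by hand as left-padding with '0' to width 32 (exact:
-- Python keeps the string unchanged when it is already at least 32 long, and then 32 - len = 0 here).
def pvBits (c : Int) : List Char :=
  let s := PySem.List.slice (PySem.Int.toBinChars0b c) (some 2) none
  List.replicate (32 - s.length) '0' ++ s

def pvBit (ch : Char) : Int := (PySem.Int.ofChars? [ch]).getD 0   -- int(bit); ValueError outside Pre_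

-- Python list indexing / item assignment on a mutable buffer, ported by hand on Array for
-- linear-time evaluation: negative indices wrap once (Python-exact); where Python raises
-- IndexError these return the default / leave the array unchanged (excluded by Pre_).
def pvAGetD (a : Array Int) (i : Int) (d : Int) : Int :=
  let j : Int := if i < 0 then i + (a.size : Int) else i
  if hj : 0 ≤ j ∧ j < (a.size : Int) then a[j.toNat]'(by omega) else d

def pvASetD (a : Array Int) (i : Int) (v : Int) : Array Int :=
  let j : Int := if i < 0 then i + (a.size : Int) else i
  if hj : 0 ≤ j ∧ j < (a.size : Int) then a.set j.toNat v (by omega) else a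

def pvA_x1init (len : Int) : Array Int :=
  pvASetD (pvASetD (Array.replicate len.toNat 0) 0 1) 30 0

def pvA_x2init (c_init : Int) (len : Int) : Array Int :=
  (PySem.List.enumerate (pvBits c_init) 0).foldl
    (fun x2 ib => pvASetD x2 ib.1 (pvBit ib.2)) (Array.replicate len.toNat 0)

def pvA_step (p : Array Int × Array Int) (n : Int) : Array Int × Array Int :=
  (pvASetD p.1 (n + 31)
     (PySem.Int.mod (pvAGetD p.1 (n + 3) 0 + pvAGetD p.1 n 0) 2),
   pvASetD p.2 (n + 31)
     (PySem.Int.mod (pvAGetD p.2 (n + 3) 0 + pvAGetD p.2 (n + 2) 0 +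
                     pvAGetD p.2 (n + 1) 0 + pvAGetD p.2 n 0) 2))

def get_pseudorandom_sequence (c_init : Int) (sequence_length : Int) (Nc : Int) : List Int :=
  let xf := (PySem.List.pyRange 0 (Nc + sequence_length) 1).foldl pvA_step
              (pvA_x1init (32 + Nc + sequence_length), pvA_x2init c_init (32 + Nc + sequence_length))
  ((PySem.List.pyRange 0 sequence_length 1).foldl
    (fun c n => pvASetD c n
       (PySem.Int.mod (pvAGetD xf.1 (n + Nc) 0 + pvAGetD xf.2 (n + Nc) 0) 2))
    (Array.replicate sequence_length.toNat 0)).toList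

-- ===== PORT B =====
def pvInit1 : List Int := 1 :: List.replicate 30 0            -- [1] + [0]*30

def pvInit2 (c_init : Int) : List Int :=
  (PySem.List.slice (pvBits c_init) none (some 31)).map pvBit -- [int(b) for b in bits[:31]]

def pvB_step (Nc : Int) (st : List Int × List Int × List Int) (t : Int) :
    List Int × List Int × List Int :=
  let out := if Nc ≤ t then
      st.1 ++ [PySem.Int.mod (PySem.List.pyGetD st.2.1 0 0 + PySem.List.pyGetD st.2.2 0 0) 2]
    else st.1
  let w1 := PySem.List.slice st.2.1 (some 1) none ++
      [PySem.Int.mod (PySem.List.pyGetD st.2.1 3 0 + PySem.List.pyGetD st.2.1 0 0) 2]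
  let w2 := PySem.List.slice st.2.2 (some 1) none ++
      [PySem.Int.mod (PySem.List.pyGetD st.2.2 3 0 + PySem.List.pyGetD st.2.2 2 0 +
                      PySem.List.pyGetD st.2.2 1 0 + PySem.List.pyGetD st.2.2 0 0) 2]
  (out, w1, w2)

def get_pseudorandom_sequence_alt (c_init : Int) (sequence_length : Int) (Nc : Int) : List Int :=
  ((PySem.List.pyRange 0 (Nc + sequence_length) 1).foldl (pvB_step Nc)
    ([], pvInit1, pvInit2 c_init)).1

-- ===== PRECONDITION & SPEC =====
-- Pre_ excludes the inputs on which A raises (c_init < 0: int('b') ValueError on the '-0b…'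
-- digits; Nc + sequence_length < 0: the 32-slot seed loop overruns the shorter arrays with
-- IndexError) and, although A still returns there, negative Nc: a negative warmup count is
-- outside the function's natural domain (the LTE spec's Nc is the constant 1600), and there A's
-- extraction reads x[n+Nc] through Python negative-index wraparound.
def Pre_get_pseudorandom_sequence (c_init : Int) (sequence_length : Int) (Nc : Int) : Prop :=
  0 ≤ c_init ∧ 0 ≤ Nc ∧ 0 ≤ Nc + sequence_length
instance (c_init : Int) (sequence_length : Int) (Nc : Int) :
    Decidable (Pre_get_pseudorandom_sequence c_init sequence_length Nc) := by
  unfold Pre_get_pseudorandom_sequence; infer_instance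

def pvWitness_get_pseudorandom_sequence : Int × Int × Int := (3, 2, 1)

def Spec_get_pseudorandom_sequence (c_init : Int) (sequence_length : Int) (Nc : Int)
    (out : List Int) : Prop :=
  out = get_pseudorandom_sequence_alt c_init sequence_length Nc
instance (c_init : Int) (sequence_length : Int) (Nc : Int) (out : List Int) :
    Decidable (Spec_get_pseudorandom_sequence c_init sequence_length Nc out) := by
  unfold Spec_get_pseudorandom_sequence; infer_instance

-- ===== CLAIM (what is proved, stated in full; the proofs are below) =====
def Claim_equal_get_pseudorandom_sequence : Prop :=
  ∀ (c_init : Int) (sequence_length : Int) (Nc : Int),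
    Dom_get_pseudorandom_sequence c_init sequence_length Nc →
    Pre_get_pseudorandom_sequence c_init sequence_length Nc →
    Spec_get_pseudorandom_sequence c_init sequence_length Nc
      (get_pseudorandom_sequence c_init sequence_length Nc)

-- ===== LEMMAS AND PROOFS =====

-- the x1 recurrence x[n] = (x[n-28] + x[n-31]) % 2 with 31 initial values
def pvF1 (init : List Int) (n : Nat) : Int :=
  if n < 31 then init.getD n 0
  else PySem.Int.mod (pvF1 init (n - 28) + pvF1 init (n - 31)) 2
termination_by n
decreasing_by all_goals omega

-- the x2 recurrence x[n] = (x[n-28] + x[n-29] + x[n-30] + x[n-31]) % 2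
def pvF2 (init : List Int) (n : Nat) : Int :=
  if n < 31 then init.getD n 0
  else PySem.Int.mod (pvF2 init (n - 28) + pvF2 init (n - 29) +
                      pvF2 init (n - 30) + pvF2 init (n - 31)) 2
termination_by n
decreasing_by all_goals omega

lemma pvF1_lt (init : List Int) {n : Nat} (h : n < 31) : pvF1 init n = init.getD n 0 := by
  rw [pvF1]; simp [h]

lemma pvF1_ge (init : List Int) {n : Nat} (h : 31 ≤ n) :
    pvF1 init n = PySem.Int.mod (pvF1 init (n - 28) + pvF1 init (n - 31)) 2 := by
  rw [pvF1]; simp [Nat.not_lt.2 h]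

lemma pvF2_lt (init : List Int) {n : Nat} (h : n < 31) : pvF2 init n = init.getD n 0 := by
  rw [pvF2]; simp [h]

lemma pvF2_ge (init : List Int) {n : Nat} (h : 31 ≤ n) :
    pvF2 init n = PySem.Int.mod (pvF2 init (n - 28) + pvF2 init (n - 29) +
                                 pvF2 init (n - 30) + pvF2 init (n - 31)) 2 := by
  rw [pvF2]; simp [Nat.not_lt.2 h]

def pvVal (c : Int) (t : Nat) : Int :=
  PySem.Int.mod (pvF1 pvInit1 t + pvF2 (pvInit2 c) t) 2

def pvWin (f : Nat → Int) (t : Nat) : List Int := (List.range 31).map (fun j => f (t + j))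

def pvOut (c Nc : Int) (m : Nat) : List Int :=
  ((List.range m).filter (fun (t : Nat) => decide (Nc ≤ (t : Int)))).map (pvVal c)

def pvModel (f : Nat → Int) (a0 : List Int) (m : Nat) : List Int :=
  (List.range a0.length).map (fun i => if i < 31 + m then f i else a0.getD i 0)

-- generic: a foldl over range(k) maintaining invariant I
lemma pv_foldl_range {σ : Type} (g : σ → Int → σ) (I : Nat → σ) :
    ∀ (k : Nat), (∀ m, m < k → g (I m) (m : Int) = I (m + 1)) →
    (PySem.List.pyRange 0 (k : Int) 1).foldl g (I 0) = I k := by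
  intro k
  induction k with
  | zero => intro _; simp [PySem.List.pyRange_one_eq_nil]
  | succ k ih =>
    intro h
    have hc : ((k + 1 : Nat) : Int) = (k : Int) + 1 := by push_cast; ring
    rw [hc, PySem.List.pyRange_one_succ_right (by exact_mod_cast Nat.zero_le k),
        List.foldl_append, ih (fun m hm => h m (by omega))]
    simpa using h k (by omega)

lemma pvModel_zero (f : Nat → Int) (a0 : List Int)
    (h : ∀ i, i < 31 → i < a0.length → f i = a0.getD i 0) : pvModel f a0 0 = a0 := by
  apply List.ext_getElem (by simp [pvModel])
  intro i h1 h2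
  simp only [pvModel, List.getElem_map, List.getElem_range]
  have h2' : i < a0.length := by simpa [pvModel] using h1
  by_cases hi : i < 31
  · rw [if_pos (by omega), h i hi h2', List.getD_eq_getElem _ _ h2']
  · rw [if_neg (by omega), List.getD_eq_getElem _ _ h2']

lemma pvModel_length (f : Nat → Int) (a0 : List Int) (m : Nat) :
    (pvModel f a0 m).length = a0.length := by simp [pvModel]

lemma pvModel_getD (f : Nat → Int) (a0 : List Int) (m j : Nat)
    (hj : j < 31 + m) (hjL : j < a0.length) :
    (pvModel f a0 m).getD j 0 = f j := by
  have hlt : j < (pvModel f a0 m).length := by rw [pvModel_length]; omega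
  rw [List.getD_eq_getElem _ _ hlt]
  simp only [pvModel, List.getElem_map, List.getElem_range]
  rw [if_pos hj]

lemma pvModel_set (f : Nat → Int) (a0 : List Int) (m : Nat) (h31 : 31 + m < a0.length)
    (v : Int) (hv : v = f (31 + m)) :
    (pvModel f a0 m).set (m + 31) v = pvModel f a0 (m + 1) := by
  apply List.ext_getElem (by simp [pvModel])
  intro i h1 h2
  have hiL : i < a0.length := by simpa [pvModel] using h2
  rw [List.getElem_set]
  simp only [pvModel, List.getElem_map, List.getElem_range]
  by_cases he : m + 31 = i
  · rw [if_pos he, if_pos (by omega)]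
    rw [hv]; congr 1; omega
  · rw [if_neg he]
    by_cases hlt : i < 31 + m
    · rw [if_pos hlt, if_pos (by omega)]
    · rw [if_neg hlt, if_neg (by omega)]

-- sets at indices ≥ s leave indices < s untouched
lemma pv_seed_low (f : Char → Int) :
    ∀ (bs : List Char) (s : Nat) (a : List Int) (i : Nat), i < s →
    ((PySem.List.enumerate bs (s : Int)).foldl
      (fun acc ib => PySem.List.pySetD acc ib.1 (f ib.2)) a).getD i 0 = a.getD i 0 := by
  intro bs
  induction bs with
  | nil => intro s a i _; simp [PySem.List.enumerate]
  | cons b bs ih =>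
    intro s a i hi
    rw [PySem.List.enumerate_cons]
    have hc : (s : Int) + 1 = ((s + 1 : Nat) : Int) := by push_cast; ring
    simp only [List.foldl_cons, hc, PySem.List.pySetD_natCast]
    rw [ih (s + 1) _ i (by omega)]
    rw [List.getD_eq_getElem?_getD, List.getD_eq_getElem?_getD,
        List.getElem?_set_ne (by omega : s ≠ i)]

lemma pv_seed_length (f : Char → Int) :
    ∀ (bs : List Char) (s : Int) (a : List Int),
    ((PySem.List.enumerate bs s).foldl
      (fun acc ib => PySem.List.pySetD acc ib.1 (f ib.2)) a).length = a.length := by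
  intro bs
  induction bs with
  | nil => intro s a; simp [PySem.List.enumerate]
  | cons b bs ih =>
    intro s a
    rw [PySem.List.enumerate_cons]
    simp only [List.foldl_cons]
    rw [ih, PySem.List.length_pySetD]

lemma pv_seed_getD (f : Char → Int) :
    ∀ (bs : List Char) (s : Nat) (a : List Int) (i : Nat),
    s + bs.length ≤ a.length → s ≤ i → i < s + bs.length →
    ((PySem.List.enumerate bs (s : Int)).foldl
      (fun acc ib => PySem.List.pySetD acc ib.1 (f ib.2)) a).getD i 0 = f (bs.getD (i - s) ' ') := by
  intro bs
  induction bs with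
  | nil => intro s a i _ h1 h2; simp at h2; omega
  | cons b bs ih =>
    intro s a i hlen hsi hi
    rw [PySem.List.enumerate_cons]
    have hc : (s : Int) + 1 = ((s + 1 : Nat) : Int) := by push_cast; ring
    simp only [List.foldl_cons, hc, PySem.List.pySetD_natCast]
    simp only [List.length_cons] at hlen hi
    by_cases he : i = s
    · subst he
      rw [pv_seed_low f bs (i + 1) _ i (by omega)]
      rw [List.getD_eq_getElem?_getD, List.getElem?_set_self (by omega : i < a.length)]
      simp
    · rw [ih (s + 1) _ i (by rw [List.length_set]; omega) (by omega) (by omega)]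
      have hsub : i - s = (i - (s + 1)) + 1 := by omega
      rw [hsub, List.getD_cons_succ]

-- pvBits facts
lemma pvBits_length_ge (c : Int) : 32 ≤ (pvBits c).length := by
  simp only [pvBits, List.length_append, List.length_replicate]
  omega

lemma pvBits_length (c : Int) (h0 : 0 ≤ c) (h1 : c ≤ 2147483648) : (pvBits c).length = 32 := by
  have hd : (PySem.List.slice (PySem.Int.toBinChars0b c) (some 2) none).length ≤ 32 := by
    rw [show (2 : Int) = ((2 : Nat) : Int) from rfl, PySem.List.slice_from_natCast]
    have hbin : PySem.Int.toBinChars0b c = '0' :: 'b' :: Nat.toDigits 2 c.toNat := by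
      simp [PySem.Int.toBinChars0b, not_lt.2 h0]
    rw [hbin]
    simp only [List.drop_succ_cons, List.drop_zero, List.length_drop]
    exact Nat.toDigits_length 2 c.toNat 32 (by norm_num)
      (by calc c.toNat ≤ 2147483648 := by omega
            _ < 2 ^ 32 := by norm_num)
  simp only [pvBits, List.length_append, List.length_replicate]
  omega

-- window lemmas
lemma pvWin_getD (f : Nat → Int) (t j : Nat) (h : j < 31) :
    (pvWin f t).getD j 0 = f (t + j) := by
  have hlt : j < (pvWin f t).length := by simp [pvWin]; omega
  rw [List.getD_eq_getElem _ _ hlt]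
  simp [pvWin]

lemma pvWin_step (f : Nat → Int) (t : Nat) (v : Int) (hv : v = f (t + 31)) :
    (pvWin f t).tail ++ [v] = pvWin f (t + 1) := by
  have h1 : (pvWin f t).tail = (List.range 30).map (fun j => f (t + 1 + j)) := by
    have h31 : List.range 31 = 0 :: (List.range 30).map Nat.succ := List.range_succ_eq_map
    simp only [pvWin]
    rw [h31, List.map_cons, List.map_map, List.tail_cons]
    apply List.map_congr_left
    intro j _
    simp only [Function.comp_apply]
    congr 1
    omega
  have h2 : pvWin f (t + 1) = (List.range 30).map (fun j => f (t + 1 + j)) ++ [f (t + 1 + 30)] := by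
    simp only [pvWin, show (31 : Nat) = 30 + 1 from rfl, List.range_succ, List.map_append,
      List.map_cons, List.map_nil]
  rw [h1, h2, hv, show t + 1 + 30 = t + 31 from by omega]

lemma pvWin_init (init : List Int) (f : Nat → Int)
    (hlen : init.length = 31) (hf : ∀ j, j < 31 → f j = init.getD j 0) :
    pvWin f 0 = init := by
  apply List.ext_getElem (by simp [pvWin, hlen])
  intro i h1 h2
  simp only [pvWin, List.getElem_map, List.getElem_range, Nat.zero_add]
  have hi : i < 31 := by simpa [pvWin] using h1
  rw [hf i hi, List.getD_eq_getElem _ _ (by omega)]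

-- the filtered range is a shifted range
lemma pv_filter_range (a b : Nat) :
    (List.range (a + b)).filter (fun (t : Nat) => decide ((a : Int) ≤ (t : Int))) =
      (List.range b).map (a + ·) := by
  induction b with
  | zero =>
    simp only [Nat.add_zero, List.range_zero, List.map_nil]
    apply List.filter_eq_nil_iff.2
    intro t ht
    have h := List.mem_range.1 ht
    simp only [decide_eq_true_eq]
    push_neg
    exact_mod_cast h
  | succ b ih =>
    rw [show a + (b + 1) = (a + b) + 1 from rfl, List.range_succ, List.filter_append,
        List.range_succ, List.map_append, ih]
    simp


-- Array/List bridge for the hand-ported indexing helpers (all ports' indices inside Pre_ are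
-- nonnegative and these lemmas cover exactly that case)
lemma pvArr_eq_of_toList {a b : Array Int} (h : a.toList = b.toList) : a = b := by
  cases a; cases b; simpa using h

lemma pvASetD_natCast (a : Array Int) (n : Nat) (v : Int) :
    (pvASetD a (n : Int) v).toList = a.toList.set n v := by
  simp only [pvASetD]
  simp only [if_neg (by omega : ¬ ((n : Int) < 0))]
  by_cases h : n < a.size
  · rw [dif_pos (by constructor <;> omega), Array.toList_set]
    norm_num
  · rw [dif_neg (by omega), List.set_eq_of_length_le (by rw [Array.length_toList]; omega)]

lemma pvAGetD_natCast (a : Array Int) (n : Nat) (d : Int) :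
    pvAGetD a (n : Int) d = a.toList.getD n d := by
  simp only [pvAGetD]
  simp only [if_neg (by omega : ¬ ((n : Int) < 0))]
  by_cases h : n < a.size
  · rw [dif_pos (by constructor <;> omega),
       List.getD_eq_getElem _ _ (by rw [Array.length_toList]; exact h), Array.getElem_toList]
    norm_num
  · rw [dif_neg (by omega), List.getD_eq_getElem?_getD,
       List.getElem?_eq_none (by rw [Array.length_toList]; omega)]
    rfl

-- initial-array pointwise facts
lemma pvInit1_getD (i : Nat) (hi : i < 31) :
    pvInit1.getD i 0 = if i = 0 then 1 else 0 := by
  cases i with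
  | zero => rfl
  | succ n =>
    simp only [pvInit1, List.getD_cons_succ, Nat.succ_ne_zero, if_false]
    rw [List.getD_eq_getElem?_getD, List.getElem?_replicate, if_pos (by omega)]
    rfl

lemma pvA_x1init_toList (len : Int) :
    (pvA_x1init len).toList = ((List.replicate len.toNat 0).set 0 1).set 30 0 := by
  show (pvASetD (pvASetD (Array.replicate len.toNat 0) ((0 : Nat) : Int) 1) ((30 : Nat) : Int) 0).toList
      = ((List.replicate len.toNat 0).set 0 1).set 30 0
  rw [pvASetD_natCast]
  apply congrArg (fun l => List.set l 30 0)
  rw [pvASetD_natCast, Array.toList_replicate]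

lemma pvA_x1init_length (len : Int) : (pvA_x1init len).toList.length = len.toNat := by
  rw [pvA_x1init_toList]
  simp

lemma pvA_x1init_getD (len : Int) (hL : 32 ≤ len) (i : Nat) (hi : i < 31) :
    (pvA_x1init len).toList.getD i 0 = pvInit1.getD i 0 := by
  have hLn : 32 ≤ len.toNat := by omega
  rw [pvInit1_getD i hi, pvA_x1init_toList]
  rw [List.getD_eq_getElem?_getD, List.getElem?_set, List.getElem?_set, List.getElem?_replicate]
  by_cases h30 : (30 : Nat) = i
  · rw [if_pos h30, if_pos (by rw [List.length_set, List.length_replicate]; omega)]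
    simp [← h30]
  · rw [if_neg h30]
    by_cases h0 : (0 : Nat) = i
    · rw [if_pos h0, if_pos (by rw [List.length_replicate]; omega)]
      simp [← h0]
    · rw [if_neg h0, if_pos (by omega)]
      simp [Ne.symm h0]

-- Array/List bridge for the seed loop
lemma pv_seedA (bs : List Char) : ∀ (s : Nat) (a : Array Int),
    ((PySem.List.enumerate bs (s : Int)).foldl
      (fun x2 ib => pvASetD x2 ib.1 (pvBit ib.2)) a).toList
    = (PySem.List.enumerate bs (s : Int)).foldl
      (fun xs ib => PySem.List.pySetD xs ib.1 (pvBit ib.2)) a.toList := by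
  induction bs with
  | nil => intro sv a; simp [PySem.List.enumerate]
  | cons b bs ih =>
    intro sv a
    rw [PySem.List.enumerate_cons]
    have hc : (sv : Int) + 1 = ((sv + 1 : Nat) : Int) := by push_cast; ring
    simp only [List.foldl_cons, hc]
    rw [ih (sv + 1) (pvASetD a (sv : Int) (pvBit b))]
    rw [pvASetD_natCast, PySem.List.pySetD_natCast]

lemma pvA_x2init_toList (c len : Int) :
    (pvA_x2init c len).toList = (PySem.List.enumerate (pvBits c) 0).foldl
      (fun xs ib => PySem.List.pySetD xs ib.1 (pvBit ib.2)) (List.replicate len.toNat 0) := by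
  unfold pvA_x2init
  rw [show (0 : Int) = ((0 : Nat) : Int) from rfl, pv_seedA, Array.toList_replicate]

lemma pvA_x2init_length (c len : Int) : (pvA_x2init c len).toList.length = len.toNat := by
  rw [pvA_x2init_toList, pv_seed_length]
  simp

lemma pvInit2_length (c : Int) : (pvInit2 c).length = 31 := by
  have h := pvBits_length_ge c
  simp only [pvInit2, List.length_map,
    show (31 : Int) = ((31 : Nat) : Int) from rfl, PySem.List.slice_to_natCast,
    List.length_take]
  omega

lemma pvInit2_getD (c : Int) (i : Nat) (hi : i < 31) :
    (pvInit2 c).getD i 0 = pvBit ((pvBits c).getD i ' ') := by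
  have hb := pvBits_length_ge c
  have hlen : i < (pvInit2 c).length := by rw [pvInit2_length]; omega
  rw [List.getD_eq_getElem _ _ hlen]
  simp only [pvInit2, show (31 : Int) = ((31 : Nat) : Int) from rfl,
    PySem.List.slice_to_natCast, List.getElem_map, List.getElem_take]
  rw [List.getD_eq_getElem _ _ (by omega)]

lemma pvA_x2init_getD (c len : Int) (h0 : 0 ≤ c) (h1 : c ≤ 2147483648) (hL : 32 ≤ len)
    (i : Nat) (hi : i < 31) :
    (pvA_x2init c len).toList.getD i 0 = (pvInit2 c).getD i 0 := by
  rw [pvInit2_getD c i hi, pvA_x2init_toList]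
  have hb : (pvBits c).length = 32 := pvBits_length c h0 h1
  have h := pv_seed_getD pvBit (pvBits c) 0 (List.replicate len.toNat 0) i
    (by simp only [List.length_replicate, hb]; omega)
    (by omega) (by rw [hb]; omega)
  simp only [Nat.cast_zero, Nat.sub_zero] at h
  exact h

-- B characterization: the alt port equals pvOut
lemma pvB_char (c seq Nc : Int) (hk : 0 ≤ Nc + seq) :
    get_pseudorandom_sequence_alt c seq Nc = pvOut c Nc (Nc + seq).toNat := by
  set k := (Nc + seq).toNat with hkdef
  have hcast : (k : Int) = Nc + seq := Int.toNat_of_nonneg hk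
  have hstep : ∀ m, m < k →
      pvB_step Nc (pvOut c Nc m, pvWin (pvF1 pvInit1) m, pvWin (pvF2 (pvInit2 c)) m) (m : Int)
        = (pvOut c Nc (m + 1), pvWin (pvF1 pvInit1) (m + 1), pvWin (pvF2 (pvInit2 c)) (m + 1)) := by
    intro m hm
    have g1 : ∀ (f : Nat → Int) (j : Nat), j < 31 →
        PySem.List.pyGetD (pvWin f m) (OfNat.ofNat j) 0 = f (m + j) := by
      intro f j hj
      rw [PySem.List.pyGetD_ofNat', pvWin_getD f m j hj]
    simp only [pvB_step, Prod.mk.injEq]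
    refine ⟨?_, ?_, ?_⟩
    · -- output component
      rw [g1 (pvF1 pvInit1) 0 (by norm_num), g1 (pvF2 (pvInit2 c)) 0 (by norm_num)]
      by_cases hNle : Nc ≤ (m : Int)
      · have hb : decide (Nc ≤ (m : Int)) = true := by simp [hNle]
        rw [if_pos hNle]
        simp only [pvOut, List.range_succ, List.filter_append, List.filter_cons,
          List.filter_nil, hb, List.map_append, List.map_cons, List.map_nil, if_true]
        rfl
      · have hb : decide (Nc ≤ (m : Int)) = false := by simp [hNle]
        rw [if_neg hNle]
        simp only [pvOut, List.range_succ, List.filter_append, List.filter_cons,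
          List.filter_nil, hb, List.map_append, List.map_nil, List.append_nil,
          Bool.false_eq_true, if_false]
    · -- w1 component
      rw [PySem.List.slice_from_one, g1 (pvF1 pvInit1) 3 (by norm_num),
          g1 (pvF1 pvInit1) 0 (by norm_num)]
      apply pvWin_step
      rw [pvF1_ge _ (by omega : 31 ≤ m + 31),
          show m + 31 - 28 = m + 3 from by omega, show m + 31 - 31 = m from by omega,
          show m + 0 = m from by omega]
    · -- w2 component
      rw [PySem.List.slice_from_one, g1 (pvF2 (pvInit2 c)) 3 (by norm_num),
          g1 (pvF2 (pvInit2 c)) 2 (by norm_num), g1 (pvF2 (pvInit2 c)) 1 (by norm_num),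
          g1 (pvF2 (pvInit2 c)) 0 (by norm_num)]
      apply pvWin_step
      rw [pvF2_ge _ (by omega : 31 ≤ m + 31),
          show m + 31 - 28 = m + 3 from by omega, show m + 31 - 29 = m + 2 from by omega,
          show m + 31 - 30 = m + 1 from by omega, show m + 31 - 31 = m from by omega,
          show m + 0 = m from by omega]
  have hI0 : (([], pvInit1, pvInit2 c) : List Int × List Int × List Int)
      = (pvOut c Nc 0, pvWin (pvF1 pvInit1) 0, pvWin (pvF2 (pvInit2 c)) 0) := by
    simp only [Prod.mk.injEq]
    refine ⟨?_, ?_, ?_⟩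
    · simp [pvOut]
    · exact (pvWin_init pvInit1 (pvF1 pvInit1) (by simp [pvInit1]) (fun j hj => pvF1_lt _ hj)).symm
    · exact (pvWin_init (pvInit2 c) (pvF2 (pvInit2 c)) (pvInit2_length c)
        (fun j hj => pvF2_lt _ hj)).symm
  have hrange : PySem.List.pyRange 0 (Nc + seq) 1 = PySem.List.pyRange 0 ((k : Nat) : Int) 1 := by
    rw [hcast]
  unfold get_pseudorandom_sequence_alt
  rw [hrange, hI0,
      pv_foldl_range (pvB_step Nc)
        (fun m => (pvOut c Nc m, pvWin (pvF1 pvInit1) m, pvWin (pvF2 (pvInit2 c)) m)) k hstep]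

-- A's recurrence loop fills the arrays with the recurrence values
set_option maxHeartbeats 1000000 in
lemma pvA_arrays (c seq Nc : Int) (h0 : 0 ≤ c) (h1 : c ≤ 2147483648) (hk : 0 ≤ Nc + seq) :
    (PySem.List.pyRange 0 (Nc + seq) 1).foldl pvA_step
      (pvA_x1init (32 + Nc + seq), pvA_x2init c (32 + Nc + seq)) =
    (Array.mk (pvModel (pvF1 pvInit1) (pvA_x1init (32 + Nc + seq)).toList (Nc + seq).toNat),
     Array.mk (pvModel (pvF2 (pvInit2 c)) (pvA_x2init c (32 + Nc + seq)).toList (Nc + seq).toNat)) := by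
  set k := (Nc + seq).toNat with hkdef
  have hcast : (k : Int) = Nc + seq := Int.toNat_of_nonneg hk
  set X1 := (pvA_x1init (32 + Nc + seq)).toList with hX1
  set X2 := (pvA_x2init c (32 + Nc + seq)).toList with hX2
  have hL1 : X1.length = 32 + k := by rw [hX1, pvA_x1init_length]; omega
  have hL2 : X2.length = 32 + k := by rw [hX2, pvA_x2init_length]; omega
  have hget : ∀ (f : Nat → Int) (X : List Int) (m : Nat) (j : Nat), X.length = 32 + k →
      j < 31 + m → j < 32 + k → pvAGetD (Array.mk (pvModel f X m)) ((j : Nat) : Int) 0 = f j := by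
    intro f X m j hXL hj hjk
    rw [pvAGetD_natCast]
    exact pvModel_getD f X m j hj (by omega)
  have hstep : ∀ m, m < k →
      pvA_step (Array.mk (pvModel (pvF1 pvInit1) X1 m),
                Array.mk (pvModel (pvF2 (pvInit2 c)) X2 m)) (m : Int)
        = (Array.mk (pvModel (pvF1 pvInit1) X1 (m + 1)),
           Array.mk (pvModel (pvF2 (pvInit2 c)) X2 (m + 1))) := by
    intro m hm
    have c3 : (m : Int) + 3 = ((m + 3 : Nat) : Int) := by push_cast; ring
    have c2 : (m : Int) + 2 = ((m + 2 : Nat) : Int) := by push_cast; ring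
    have c1 : (m : Int) + 1 = ((m + 1 : Nat) : Int) := by push_cast; ring
    have c31 : (m : Int) + 31 = ((m + 31 : Nat) : Int) := by push_cast; ring
    simp only [pvA_step, Prod.mk.injEq]
    refine ⟨?_, ?_⟩
    · rw [c3, hget _ _ _ _ hL1 (by omega) (by omega), hget _ _ _ _ hL1 (by omega) (by omega)]
      apply pvArr_eq_of_toList
      rw [c31, pvASetD_natCast]
      show (pvModel (pvF1 pvInit1) X1 m).set (m + 31) _ = _
      rw [pvModel_set _ _ _ (by omega) _ (by
        rw [pvF1_ge _ (by omega : 31 ≤ 31 + m),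
            show 31 + m - 28 = m + 3 from by omega, show 31 + m - 31 = m from by omega])]
    · rw [c3, c2, c1, hget _ _ _ _ hL2 (by omega) (by omega),
          hget _ _ _ _ hL2 (by omega) (by omega), hget _ _ _ _ hL2 (by omega) (by omega),
          hget _ _ _ _ hL2 (by omega) (by omega)]
      apply pvArr_eq_of_toList
      rw [c31, pvASetD_natCast]
      show (pvModel (pvF2 (pvInit2 c)) X2 m).set (m + 31) _ = _
      rw [pvModel_set _ _ _ (by omega) _ (by
        rw [pvF2_ge _ (by omega : 31 ≤ 31 + m),
            show 31 + m - 28 = m + 3 from by omega, show 31 + m - 29 = m + 2 from by omega,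
            show 31 + m - 30 = m + 1 from by omega, show 31 + m - 31 = m from by omega])]
  have hI0 : (pvA_x1init (32 + Nc + seq), pvA_x2init c (32 + Nc + seq))
      = (Array.mk (pvModel (pvF1 pvInit1) X1 0), Array.mk (pvModel (pvF2 (pvInit2 c)) X2 0)) := by
    simp only [Prod.mk.injEq]
    refine ⟨?_, ?_⟩
    · apply pvArr_eq_of_toList
      show X1 = _
      refine (pvModel_zero _ _ (fun i hi hiL => ?_)).symm
      rw [pvF1_lt _ hi, hX1, pvA_x1init_getD _ (by omega) i hi]
    · apply pvArr_eq_of_toList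
      show X2 = _
      refine (pvModel_zero _ _ (fun i hi hiL => ?_)).symm
      rw [pvF2_lt _ hi, hX2, pvA_x2init_getD c _ h0 h1 (by omega) i hi]
  have hrange : PySem.List.pyRange 0 (Nc + seq) 1 = PySem.List.pyRange 0 ((k : Nat) : Int) 1 := by
    rw [hcast]
  rw [hrange, hI0]
  exact pv_foldl_range pvA_step
    (fun m => (Array.mk (pvModel (pvF1 pvInit1) X1 m),
               Array.mk (pvModel (pvF2 (pvInit2 c)) X2 m))) k hstep

-- projection forms used to rewrite inside A's output loop
lemma pvA_arrays_fst (c seq Nc : Int) (h0 : 0 ≤ c) (h1 : c ≤ 2147483648) (hk : 0 ≤ Nc + seq) :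
    ((PySem.List.pyRange 0 (Nc + seq) 1).foldl pvA_step
      (pvA_x1init (32 + Nc + seq), pvA_x2init c (32 + Nc + seq))).1 =
    Array.mk (pvModel (pvF1 pvInit1) (pvA_x1init (32 + Nc + seq)).toList (Nc + seq).toNat) := by
  rw [pvA_arrays c seq Nc h0 h1 hk]

lemma pvA_arrays_snd (c seq Nc : Int) (h0 : 0 ≤ c) (h1 : c ≤ 2147483648) (hk : 0 ≤ Nc + seq) :
    ((PySem.List.pyRange 0 (Nc + seq) 1).foldl pvA_step
      (pvA_x1init (32 + Nc + seq), pvA_x2init c (32 + Nc + seq))).2 =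
    Array.mk (pvModel (pvF2 (pvInit2 c)) (pvA_x2init c (32 + Nc + seq)).toList (Nc + seq).toNat) := by
  rw [pvA_arrays c seq Nc h0 h1 hk]

-- the output-collection loop of A
lemma pvC_step (v : Nat → Int) (s m : Nat) (hm : m < s) :
    ((List.range s).map (fun n => if n < m then v n else 0)).set m (v m)
      = (List.range s).map (fun n => if n < m + 1 then v n else 0) := by
  apply List.ext_getElem (by simp)
  intro i h1 h2
  rw [List.getElem_set]
  simp only [List.getElem_map, List.getElem_range]
  by_cases he : m = i
  · rw [if_pos he, if_pos (by omega)]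
    rw [← he]
  · rw [if_neg he]
    by_cases hlt : i < m
    · rw [if_pos hlt, if_pos (by omega)]
    · rw [if_neg hlt, if_neg (by omega)]

lemma pvA_char (c seq Nc : Int) (h0 : 0 ≤ c) (h1 : c ≤ 2147483648)
    (hNc : 0 ≤ Nc) (hseq : 0 ≤ seq) :
    get_pseudorandom_sequence c seq Nc
      = (List.range seq.toNat).map (fun n => pvVal c (n + Nc.toNat)) := by
  have hk : 0 ≤ Nc + seq := by omega
  set k := (Nc + seq).toNat with hkdef
  set s := seq.toNat with hsdef
  have hks : k = Nc.toNat + s := by omega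
  set X1 := (pvA_x1init (32 + Nc + seq)).toList with hX1
  set X2 := (pvA_x2init c (32 + Nc + seq)).toList with hX2
  have hL1 : X1.length = 32 + k := by rw [hX1, pvA_x1init_length]; omega
  have hL2 : X2.length = 32 + k := by rw [hX2, pvA_x2init_length]; omega
  have hscast : ((s : Nat) : Int) = seq := Int.toNat_of_nonneg hseq
  simp only [get_pseudorandom_sequence]
  rw [pvA_arrays_fst c seq Nc h0 h1 hk, pvA_arrays_snd c seq Nc h0 h1 hk]
  have hrange : PySem.List.pyRange 0 seq 1 = PySem.List.pyRange 0 ((s : Nat) : Int) 1 := by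
    rw [hscast]
  rw [hrange]
  have hstep : ∀ m, m < s →
      (fun cc (n : Int) => pvASetD cc n
        (PySem.Int.mod
          (pvAGetD (Array.mk (pvModel (pvF1 pvInit1) X1 k)) (n + Nc) 0 +
           pvAGetD (Array.mk (pvModel (pvF2 (pvInit2 c)) X2 k)) (n + Nc) 0) 2))
        (Array.mk ((List.range s).map (fun n => if n < m then pvVal c (n + Nc.toNat) else 0))) (m : Int)
      = Array.mk ((List.range s).map (fun n => if n < m + 1 then pvVal c (n + Nc.toNat) else 0)) := by
    intro m hm
    have hcastn : (m : Int) + Nc = ((m + Nc.toNat : Nat) : Int) := by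
      push_cast [Int.toNat_of_nonneg hNc]; ring
    simp only
    rw [hcastn, pvAGetD_natCast, pvAGetD_natCast]
    show pvASetD _ ((m : Nat) : Int) _ = _
    apply pvArr_eq_of_toList
    rw [pvASetD_natCast]
    show ((List.range s).map (fun n => if n < m then pvVal c (n + Nc.toNat) else 0)).set m _ = _
    rw [show ((Array.mk (pvModel (pvF1 pvInit1) X1 k)).toList : List Int)
          = pvModel (pvF1 pvInit1) X1 k from rfl,
        show ((Array.mk (pvModel (pvF2 (pvInit2 c)) X2 k)).toList : List Int)
          = pvModel (pvF2 (pvInit2 c)) X2 k from rfl,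
        pvModel_getD _ _ _ _ (by omega) (by omega), pvModel_getD _ _ _ _ (by omega) (by omega)]
    exact pvC_step (fun n => pvVal c (n + Nc.toNat)) s m hm
  have hI0 : (Array.replicate seq.toNat 0 : Array Int)
      = Array.mk ((List.range s).map (fun n => if n < 0 then pvVal c (n + Nc.toNat) else 0)) := by
    apply pvArr_eq_of_toList
    rw [Array.toList_replicate]
    show List.replicate s (0 : Int) = _
    simp only [Nat.not_lt_zero, if_false]
    rw [List.map_const']
    simp
  rw [hI0,
      pv_foldl_range _
        (fun m => Array.mk ((List.range s).map (fun n => if n < m then pvVal c (n + Nc.toNat) else 0)))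
        s hstep]
  show ((List.range s).map (fun n => if n < s then pvVal c (n + Nc.toNat) else 0)) = _
  apply List.map_congr_left
  intro n hn
  rw [if_pos (List.mem_range.1 hn)]

-- ===== VERDICT (by name: the statement is the Claim_ definition above) =====
theorem get_pseudorandom_sequence_spec : Claim_equal_get_pseudorandom_sequence := by
  intro c seq Nc hDom hPre
  obtain ⟨hc0, hNc, hk⟩ := hPre
  have hDom' : c ≤ 2147483648 := by
    unfold Dom_get_pseudorandom_sequence pvDomInt at hDom
    simp only [Bool.and_eq_true, decide_eq_true_eq] at hDom
    exact hDom.1.1.2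
  show get_pseudorandom_sequence c seq Nc = get_pseudorandom_sequence_alt c seq Nc
  rw [pvB_char c seq Nc hk]
  by_cases hseq : seq ≤ 0
  · have hA : get_pseudorandom_sequence c seq Nc = [] := by
      simp only [get_pseudorandom_sequence]
      rw [PySem.List.pyRange_one_eq_nil hseq, List.foldl_nil]
      simp [Int.toNat_of_nonpos hseq]
    rw [hA]
    symm
    simp only [pvOut, List.map_eq_nil_iff]
    apply List.filter_eq_nil_iff.2
    intro t ht
    have htk := List.mem_range.1 ht
    simp only [decide_eq_true_eq]
    push_neg
    have hlt : (t : Int) < Nc + seq := by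
      calc (t : Int) < ((Nc + seq).toNat : Int) := by exact_mod_cast htk
        _ = Nc + seq := Int.toNat_of_nonneg hk
    omega
  · push_neg at hseq
    rw [pvA_char c seq Nc hc0 hDom' hNc (by omega)]
    have hks : (Nc + seq).toNat = Nc.toNat + seq.toNat := by omega
    have hNcast : ((Nc.toNat : Nat) : Int) = Nc := Int.toNat_of_nonneg hNc
    simp only [pvOut]
    have hpred : (fun (t : Nat) => decide (Nc ≤ (t : Int)))
        = (fun (t : Nat) => decide (((Nc.toNat : Nat) : Int) ≤ (t : Int))) := by
      rw [hNcast]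
    rw [hks, hpred, pv_filter_range Nc.toNat seq.toNat, List.map_map]
    apply List.map_congr_left
    intro n _
    simp only [Function.comp_apply]
    congr 1
    omega
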